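-- pv_equiv track=rewrite | github.com/Jasonluo666/LeetCode-Repository | Python/Bad hair day.py | seeCows
-- ===== SOURCE A (Python) =====
-- def  seeCows(cows):
--     if len(cows) < 2:
--         return 0
--
--     stack = [0]
--     index = 1
--     ans = 0
--     while index < len(cows):
--         while stack and cows[index] >= cows[stack[-1]]:
--             short_index = stack.pop()
--             ans += index - short_index - 1
--
--         stack.append(index)
--         index += 1
--
--     while stack:
--         short_index = stack.pop()
--         ans += len(cows) - short_index - 1
--
--     return ans
-- ===== SOURCE B (Python) =====
-- def seeCows(cows):
--     ans = 0
--     n = len(cows)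
--     for i in range(n):
--         for j in range(i + 1, n):
--             if cows[j] >= cows[i]:
--                 break
--             ans += 1
--     return ans
-- ===== Notes on version B (the rewrite author's own statement) =====
-- stated objective: simpler
-- what changed: Replaced the monotonic-stack single pass with a direct nested scan: for each cow, walk forward counting strictly shorter cows and stop at the first equal-or-taller one.
import Mathlib
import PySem

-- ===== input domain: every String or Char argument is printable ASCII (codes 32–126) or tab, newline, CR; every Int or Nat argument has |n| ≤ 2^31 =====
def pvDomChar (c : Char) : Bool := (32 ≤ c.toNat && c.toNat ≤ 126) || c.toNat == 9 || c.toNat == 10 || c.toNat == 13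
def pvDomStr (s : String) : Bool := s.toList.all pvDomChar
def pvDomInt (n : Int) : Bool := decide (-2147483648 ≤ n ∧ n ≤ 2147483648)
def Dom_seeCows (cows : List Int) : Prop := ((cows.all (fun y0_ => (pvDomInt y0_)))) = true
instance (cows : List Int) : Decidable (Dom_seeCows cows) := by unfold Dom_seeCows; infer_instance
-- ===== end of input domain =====

-- B replaces A's monotonic-stack single pass by a plain nested forward scan (simpler, not faster).

-- ===== PORT A =====
-- The Python stack (append/pop/peek at the END) is represented head-first: head = top.
-- All stack entries are valid indices into cows, so cows[i] is ported as cows.getD i 0.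

-- inner 'while stack and cows[index] >= cows[stack[-1]]' loop
def pvPopLoop (cows : List Int) (index : Nat) : List Nat → Int → (List Nat × Int)
  | [], ans => ([], ans)
  | s :: rest, ans =>
    if cows.getD index 0 ≥ cows.getD s 0 then
      pvPopLoop cows index rest (ans + ((index : Int) - (s : Int) - 1))
    else (s :: rest, ans)

-- outer 'while index < len(cows)' loop, fuel = len(cows) - index
def pvOuterLoop (cows : List Int) : Nat → Nat → List Nat → Int → (List Nat × Int)
  | 0, _, stack, ans => (stack, ans)
  | fuel + 1, index, stack, ans =>
    let p := pvPopLoop cows index stack ans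
    pvOuterLoop cows fuel (index + 1) (index :: p.1) p.2

-- final 'while stack' loop
def pvDrainLoop (n : Nat) : List Nat → Int → Int
  | [], ans => ans
  | s :: rest, ans => pvDrainLoop n rest (ans + ((n : Int) - (s : Int) - 1))

def seeCows (cows : List Int) : Int :=
  if cows.length < 2 then 0
  else
    let p := pvOuterLoop cows (cows.length - 1) 1 [0] 0
    pvDrainLoop cows.length p.1 p.2

-- ===== PORT B =====
-- inner 'for j in range(i+1, n): if cows[j] >= cows[i]: break; ans += 1' as a walk along the suffix
def pvCountSee (h : Int) : List Int → Int
  | [] => 0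
  | c :: rest => if c ≥ h then 0 else 1 + pvCountSee h rest

-- outer 'for i in range(n)' as structural recursion over suffixes of cows
def pvAltGo : List Int → Int
  | [] => 0
  | c :: rest => pvCountSee c rest + pvAltGo rest

def seeCows_alt (cows : List Int) : Int := pvAltGo cows

-- ===== PRECONDITION & SPEC =====
def Spec_seeCows (cows : List Int) (out : Int) : Prop := out = seeCows_alt cows
instance (cows : List Int) (out : Int) : Decidable (Spec_seeCows cows out) := by unfold Spec_seeCows; infer_instance

-- ===== CLAIM (what is proved, stated in full; the proofs are below) =====
def Claim_equal_seeCows : Prop := ∀ (cows : List Int), Dom_seeCows cows → Spec_seeCows cows (seeCows cows)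

-- ===== LEMMAS AND PROOFS =====

-- number of cows a cow of height h sees over the list l
def pvTw (h : Int) (l : List Int) : Nat := (l.takeWhile (fun c => decide (c < h))).length

-- value at index i, as the ports see it
def pvG (cows : List Int) (i : Nat) : Int := cows.getD i 0

-- the contribution term of a stack entry i at loop position `index`
def pvTerm (cows : List Int) (index i : Nat) : Int :=
  (index : Int) - (i : Int) - 1 + (pvTw (pvG cows i) (cows.drop index) : Int)

-- the stack invariant: values strictly increase from top (head) towards the bottom
def pvInv (cows : List Int) (stack : List Nat) : Prop :=
  List.Pairwise (fun a b => pvG cows a < pvG cows b) stack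

lemma pvCountSee_eq (h : Int) (l : List Int) : pvCountSee h l = (pvTw h l : Int) := by
  induction l with
  | nil => simp [pvCountSee, pvTw]
  | cons c rest ih =>
      by_cases hc : c ≥ h
      · simp [pvCountSee, pvTw, hc, List.takeWhile, show ¬ c < h by omega]
      · simp [pvCountSee, pvTw, hc, List.takeWhile, show c < h by omega, ih]
        ring

lemma pvDrain_eq (n : Nat) (stack : List Nat) (ans : Int) :
    pvDrainLoop n stack ans
      = ans + (stack.map (fun i : Nat => (n : Int) - (i : Int) - 1)).sum := by
  induction stack generalizing ans with
  | nil => simp [pvDrainLoop]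
  | cons s rest ih => simp [pvDrainLoop, ih]; ring

lemma pvDrop_cons (cows : List Int) (k : Nat) (hk : k < cows.length) :
    cows.drop k = pvG cows k :: cows.drop (k + 1) := by
  rw [List.drop_eq_getElem_cons hk]
  congr 1
  simp [pvG, List.getD_eq_getElem?_getD, List.getElem?_eq_getElem hk]

lemma pvTw_stop (h : Int) (c : Int) (l : List Int) (hc : c ≥ h) :
    pvTw h (c :: l) = 0 := by
  simp [pvTw, List.takeWhile, show ¬ c < h by omega]

lemma pvTw_go (h : Int) (c : Int) (l : List Int) (hc : c < h) :
    pvTw h (c :: l) = pvTw h l + 1 := by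
  simp [pvTw, List.takeWhile, hc]

-- pvPopLoop pops the top segment with value ≤ cows[k]; its accounting
lemma pvPop_spec (cows : List Int) (k : Nat) (hk : k < cows.length) :
    ∀ (stack : List Nat) (ans : Int),
    pvInv cows stack →
    (pvPopLoop cows k stack ans).2
        + (((pvPopLoop cows k stack ans).1).map (pvTerm cows k)).sum
      = ans + (stack.map (pvTerm cows k)).sum
    ∧ pvInv cows (pvPopLoop cows k stack ans).1
    ∧ ∀ i ∈ (pvPopLoop cows k stack ans).1, pvG cows k < pvG cows i := by
  intro stack
  induction stack with
  | nil => intro ans _; simp [pvPopLoop, pvInv]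
  | cons s rest ih =>
      intro ans hch
      rw [pvInv, List.pairwise_cons] at hch
      by_cases hge : cows.getD k 0 ≥ cows.getD s 0
      · have hrec := ih (ans + ((k : Int) - (s : Int) - 1)) hch.2
        have hterm : pvTerm cows k s = (k : Int) - (s : Int) - 1 := by
          have h0 : pvTw (pvG cows s) (cows.drop k) = 0 := by
            rw [pvDrop_cons cows k hk]
            exact pvTw_stop _ _ _ (by simp [pvG] at hge ⊢; omega)
          simp [pvTerm, h0]
        simp only [pvPopLoop, hge, if_pos]
        refine ⟨?_, hrec.2.1, hrec.2.2⟩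
        rw [hrec.1]
        simp [hterm]
        ring
      · simp only [pvPopLoop, hge, if_neg, not_false_iff]
        refine ⟨by trivial, by rw [pvInv, List.pairwise_cons]; exact hch, ?_⟩
        intro i hi
        have hks : pvG cows k < pvG cows s := by simp [pvG] at hge ⊢; omega
        rcases List.mem_cons.mp hi with rfl | hit
        · exact hks
        · exact lt_trans hks (hch.1 i hit)

-- shifting a kept entry's term from position k to position k+1
lemma pvTerm_shift (cows : List Int) (k i : Nat) (hk : k < cows.length)
    (hgt : pvG cows k < pvG cows i) :
    pvTerm cows k i = pvTerm cows (k + 1) i := by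
  simp [pvTerm, pvDrop_cons cows k hk, pvTw_go _ _ _ hgt]
  ring

-- the main invariant: running the rest of the outer loop and then draining
lemma pvMain (cows : List Int) :
    ∀ (fuel index : Nat) (stack : List Nat) (ans : Int),
    index + fuel = cows.length →
    pvInv cows stack →
    pvDrainLoop cows.length (pvOuterLoop cows fuel index stack ans).1
        (pvOuterLoop cows fuel index stack ans).2
      = ans + (stack.map (pvTerm cows index)).sum
          + ((List.range' index fuel).map
              (fun j => (pvTw (pvG cows j) (cows.drop (j + 1)) : Int))).sum := by
  intro fuel
  induction fuel with
  | zero =>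
      intro index stack ans hlen hch
      simp only [pvOuterLoop]
      rw [pvDrain_eq]
      rw [show List.range' index 0 = [] from rfl]
      simp only [List.map_nil, List.sum_nil, add_zero]
      congr 1
      apply congrArg
      apply List.map_congr_left
      intro i _
      have hnil : cows.drop index = [] := List.drop_eq_nil_of_le (by omega)
      simp [pvTerm, hnil, pvTw]
      omega
  | succ fuel ih =>
      intro index stack ans hlen hch
      have hk : index < cows.length := by omega
      obtain ⟨hsum, hch', hgt⟩ := pvPop_spec cows index hk stack ans hch
      set p := pvPopLoop cows index stack ans with hp
      have hinv2 : pvInv cows (index :: p.1) := by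
        rw [pvInv, List.pairwise_cons]
        exact ⟨hgt, hch'⟩
      have hstep : pvOuterLoop cows (fuel + 1) index stack ans
          = pvOuterLoop cows fuel (index + 1) (index :: p.1) p.2 := by
        simp [pvOuterLoop, hp]
      rw [hstep, ih (index + 1) (index :: p.1) p.2 (by omega) hinv2]
      have hmap : ((index :: p.1).map (pvTerm cows (index + 1))).sum
          = (pvTw (pvG cows index) (cows.drop (index + 1)) : Int)
            + (p.1.map (pvTerm cows index)).sum := by
        simp only [List.map_cons, List.sum_cons]
        congr 1
        · simp [pvTerm]
        · apply congrArg
          apply List.map_congr_left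
          intro i hi
          exact (pvTerm_shift cows index i hk (hgt i hi)).symm
      rw [hmap]
      have hrange : List.range' index (fuel + 1)
          = index :: List.range' (index + 1) fuel := by
        simp [List.range']
      rw [hrange]
      simp only [List.map_cons, List.sum_cons]
      omega

-- B equals the indexed sum of per-cow counts
lemma pvAlt_eq (cows : List Int) :
    pvAltGo cows
      = ((List.range' 0 cows.length).map
          (fun j => (pvTw (pvG cows j) (cows.drop (j + 1)) : Int))).sum := by
  induction cows with
  | nil => simp [pvAltGo]
  | cons c rest ih =>
      have hr : List.range' 0 (rest.length + 1) = 0 :: List.range' 1 rest.length := by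
        simp [List.range']
      have hshift : ((List.range' 1 rest.length).map
            (fun j => (pvTw (pvG (c :: rest) j) ((c :: rest).drop (j + 1)) : Int))).sum
          = ((List.range' 0 rest.length).map
            (fun j => (pvTw (pvG rest j) (rest.drop (j + 1)) : Int))).sum := by
        simp only [List.range'_eq_map_range, List.map_map]
        apply congrArg
        apply List.map_congr_left
        intro j _
        simp [pvG, Nat.add_comm 1 j]
      simp only [pvAltGo, List.length_cons, hr, List.map_cons, List.sum_cons]
      rw [hshift, ← ih, pvCountSee_eq]
      simp [pvG, pvTw]

-- ===== VERDICT (by name: the statement is the Claim_ definition above) =====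
theorem seeCows_spec : Claim_equal_seeCows := by
  intro cows _
  unfold Spec_seeCows
  show seeCows cows = seeCows_alt cows
  rw [seeCows, seeCows_alt, pvAlt_eq]
  by_cases hlen : cows.length < 2
  · rw [if_pos hlen]
    match cows, hlen with
    | [], _ => simp
    | [c], _ => simp [pvTw]
  · rw [if_neg hlen]
    have h1 : (1 : Nat) + (cows.length - 1) = cows.length := by omega
    have hinv : pvInv cows [0] := by simp [pvInv]
    rw [pvMain cows (cows.length - 1) 1 [0] 0 h1 hinv]
    have hr : List.range' 0 cows.length = 0 :: List.range' 1 (cows.length - 1) := by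
      have : cows.length = (cows.length - 1) + 1 := by omega
      rw [this]
      simp [List.range']
    rw [hr]
    have ht : pvTerm cows 1 0 = (pvTw (pvG cows 0) (cows.drop 1) : Int) := by
      simp [pvTerm]
    simp only [List.map_cons, List.sum_cons, List.map_nil, List.sum_nil, ht]
    ring
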